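-- pv_equiv track=rewrite | github.com/dmereu/ftdlgas_xml2csv | xml2csv.py | filter_csv_rows
-- ===== SOURCE A (Python) =====
-- def filter_csv_rows(csv_rows, grep_filter):
--     """Filtra le righe CSV in base ai criteri specificati"""
--     if not grep_filter:
--         return csv_rows
--
--     # Divide i filtri per virgola (logica OR)
--     filters = [f.strip() for f in grep_filter.split(',') if f.strip()]
--
--     if not filters:
--         return csv_rows
--
--     filtered_rows = []
--
--     for row in csv_rows:
--         # Combina tutti i valori della riga in una stringa per la ricerca
--         row_text = ' '.join(str(value) for value in row.values()).lower()
--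
--         # Applica logica OR: se almeno un filtro matcha, includi la riga
--         for filter_term in filters:
--             filter_term = filter_term.lower()
--             if filter_term in row_text:
--                 filtered_rows.append(row)
--                 break  # Match trovato, passa alla riga successiva
--
--     return filtered_rows
-- ===== SOURCE B (Python) =====
-- def filter_csv_rows(csv_rows, grep_filter):
--     """Filtra le righe CSV in base ai criteri specificati (term-major boolean-mask sweep)"""
--     if not grep_filter:
--         return csv_rows
--
--     terms = [f.strip().lower() for f in grep_filter.split(',') if f.strip()]
--
--     if not terms:
--         return csv_rows
--
--     texts = [' '.join(str(value) for value in row.values()).lower() for row in csv_rows]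
--
--     # Term-major sweep: OR each term's matches into a boolean mask over the rows
--     mask = [False] * len(texts)
--     for term in terms:
--         mask = [m or (term in text) for m, text in zip(mask, texts)]
--
--     return [row for row, m in zip(csv_rows, mask) if m]
-- ===== Notes on version B (the rewrite author's own statement) =====
-- stated objective: alternative
-- what changed: Replaces A's row-major loop (per row, scan filters with break, lowering each term again per row) by a term-major sweep: terms are stripped+lowered once, each term ORs its matches into a boolean mask over all rows via a zip comprehension, and the masked rows are selected in one final pass.
import Mathlib
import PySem

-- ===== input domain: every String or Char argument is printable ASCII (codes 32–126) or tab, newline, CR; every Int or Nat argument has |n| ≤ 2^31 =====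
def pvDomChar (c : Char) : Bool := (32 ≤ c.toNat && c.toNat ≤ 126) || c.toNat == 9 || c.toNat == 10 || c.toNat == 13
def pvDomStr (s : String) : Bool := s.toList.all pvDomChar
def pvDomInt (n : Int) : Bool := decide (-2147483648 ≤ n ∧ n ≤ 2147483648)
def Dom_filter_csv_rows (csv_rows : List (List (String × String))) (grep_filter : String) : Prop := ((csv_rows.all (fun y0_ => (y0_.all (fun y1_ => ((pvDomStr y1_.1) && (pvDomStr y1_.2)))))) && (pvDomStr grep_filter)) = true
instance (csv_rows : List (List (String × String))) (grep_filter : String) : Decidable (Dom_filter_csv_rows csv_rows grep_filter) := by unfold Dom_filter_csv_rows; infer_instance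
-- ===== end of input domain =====

-- B replaces A's row-major loop with per-row break by a term-major boolean-mask sweep
-- (same return value; objective: alternative decomposition, not speed).

-- ===== PORT A =====
-- row_text = ' '.join(str(v) for v in row.values()).lower()  (values are strings, str() is identity)
def pvRowText (row : List (String × String)) : String :=
  PySem.Str.lower (PySem.Str.join " " (PySem.Dict.values ⟨row⟩))

def filter_csv_rows (csv_rows : List (List (String × String))) (grep_filter : String) : List (List (String × String)) :=
  if grep_filter = "" then csv_rows else
  let filters := (((PySem.Str.split? grep_filter ",").getD []).filter (fun f => !(PySem.Str.strip f = ""))).map PySem.Str.strip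
  if filters = [] then csv_rows else
  -- for row in csv_rows: inner for over filters with break = any
  csv_rows.foldl (fun acc row =>
    if filters.any (fun t => PySem.Str.isIn (PySem.Str.lower t) (pvRowText row)) then acc ++ [row] else acc) []

-- ===== PORT B =====
def filter_csv_rows_alt (csv_rows : List (List (String × String))) (grep_filter : String) : List (List (String × String)) :=
  if grep_filter = "" then csv_rows else
  let terms := (((PySem.Str.split? grep_filter ",").getD []).filter (fun f => !(PySem.Str.strip f = ""))).map (fun f => PySem.Str.lower (PySem.Str.strip f))
  if terms = [] then csv_rows else
  let texts := csv_rows.map pvRowText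
  -- mask = [False] * len(texts); for term: mask = [m or (term in text) for m, text in zip(mask, texts)]
  let mask := terms.foldl (fun mask t => (mask.zip texts).map (fun p => p.1 || PySem.Str.isIn t p.2)) (List.replicate texts.length false)
  (csv_rows.zip mask).foldl (fun out p => if p.2 then out ++ [p.1] else out) []

-- ===== PRECONDITION & SPEC =====
def Spec_filter_csv_rows (csv_rows : List (List (String × String))) (grep_filter : String) (out : List (List (String × String))) : Prop := out = filter_csv_rows_alt csv_rows grep_filter
instance (csv_rows : List (List (String × String))) (grep_filter : String) (out : List (List (String × String))) : Decidable (Spec_filter_csv_rows csv_rows grep_filter out) := by unfold Spec_filter_csv_rows; infer_instance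

-- ===== CLAIM (what is proved, stated in full; the proofs are below) =====
def Claim_equal_filter_csv_rows : Prop := ∀ (csv_rows : List (List (String × String))) (grep_filter : String), Dom_filter_csv_rows csv_rows grep_filter → Spec_filter_csv_rows csv_rows grep_filter (filter_csv_rows csv_rows grep_filter)

-- ===== LEMMAS AND PROOFS =====

-- A's row loop (append when any filter matches) is a filter.
theorem pv_foldl_filter {α : Type} (p : α → Bool) (xs : List α) (init : List α) :
    xs.foldl (fun acc x => if p x then acc ++ [x] else acc) init = init ++ xs.filter p := by
  induction xs generalizing init with
  | nil => simp
  | cons x xs ih =>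
    simp only [List.foldl_cons, List.filter_cons]
    by_cases h : p x = true <;> simp [h, ih]

-- zipping a mapped mask with its source list
theorem pv_zip_map_self {α β : Type} (g : α → β) (xs : List α) :
    (xs.map g).zip xs = xs.map (fun x => (g x, x)) := by
  induction xs with
  | nil => rfl
  | cons x xs ih => simp [ih]

-- invariant of B's term-major sweep
theorem pv_mask_inv (terms : List String) (texts : List String) (g : String → Bool) :
    terms.foldl (fun mask t => (mask.zip texts).map (fun p => p.1 || PySem.Str.isIn t p.2)) (texts.map g)
      = texts.map (fun x => g x || terms.any (fun t => PySem.Str.isIn t x)) := by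
  induction terms generalizing g with
  | nil => simp
  | cons t ts ih =>
    simp only [List.foldl_cons, pv_zip_map_self, List.map_map]
    rw [show ((fun p : Bool × String => p.1 || PySem.Str.isIn t p.2) ∘ fun x => (g x, x))
          = (fun x => g x || PySem.Str.isIn t x) from rfl]
    rw [ih (fun x => g x || PySem.Str.isIn t x)]
    apply List.map_congr_left
    intro x _
    simp [Bool.or_assoc]

-- B's final zip loop, when the mask is csv.map q, is a filter by q.
theorem pv_zip_filter {α : Type} (q : α → Bool) (xs : List α) (init : List α) :
    (xs.zip (xs.map q)).foldl (fun out p => if p.2 then out ++ [p.1] else out) init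
      = init ++ xs.filter q := by
  induction xs generalizing init with
  | nil => simp
  | cons x xs ih =>
    simp only [List.map_cons, List.zip_cons_cons, List.foldl_cons, List.filter_cons]
    by_cases h : q x = true <;> simp [h, ih]

-- ===== VERDICT (by name: the statement is the Claim_ definition above) =====
theorem filter_csv_rows_spec : Claim_equal_filter_csv_rows := by
  intro csv grep _
  unfold Spec_filter_csv_rows filter_csv_rows filter_csv_rows_alt
  by_cases hg : grep = ""
  · simp [hg]
  · simp only [hg, if_false]
    set base := ((PySem.Str.split? grep ",").getD []).filter (fun f => !(PySem.Str.strip f = "")) with hbase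
    have hterms : base.map (fun f => PySem.Str.lower (PySem.Str.strip f))
        = (base.map PySem.Str.strip).map PySem.Str.lower := by simp [List.map_map]
    by_cases hb : base.map PySem.Str.strip = []
    · have hbe : base = [] := List.map_eq_nil_iff.mp hb
      simp [hbe]
    · have hb2 : base.map (fun f => PySem.Str.lower (PySem.Str.strip f)) ≠ [] := by
        rw [hterms]; simpa using hb
      simp only [hb, hb2, if_false]
      -- A side
      rw [pv_foldl_filter (fun row => (base.map PySem.Str.strip).any
            (fun t => PySem.Str.isIn (PySem.Str.lower t) (pvRowText row))) csv []]
      -- B side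
      have hrep : List.replicate (csv.map pvRowText).length false
          = (csv.map pvRowText).map (fun _ => false) := by simp
      rw [hrep, pv_mask_inv, List.map_map, pv_zip_filter]
      simp only [List.nil_append]
      apply List.filter_congr
      intro row _
      simp only [List.any_map]
      rfl
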